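-- pv_equiv track=rewrite | github.com/Learning-Ant/Quiz | python/programmers/month_code_challenge.py | query1
-- ===== SOURCE A (Python) =====
-- def query1(values, edges, start):
--     visit = []
--     stack = [start]
--
--     while stack:
--         node = stack.pop()
--         if node not in visit:
--             visit.append(node)
--             for i in edges:
--                 if i[0] == node:
--                     stack.append(i[1])
--     _sum = 0
--
--     for i in visit:
--         _sum += values[i - 1]
--
--     return _sum
-- ===== SOURCE B (Python) =====
-- def query1(values, edges, start):
--     adj = {}
--     for e in edges:
--         adj.setdefault(e[0], []).append(e)
--     seen = set()
--     stack = [start]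
--     total = 0
--     while stack:
--         node = stack.pop()
--         if node not in seen:
--             seen.add(node)
--             total += values[node - 1]
--             for e in adj.get(node, []):
--                 stack.append(e[1])
--     return total
-- ===== Notes on version B (the rewrite author's own statement) =====
-- stated objective: alternative
-- what changed: B groups the edges once into an adjacency dict (keyed by source, storing the edges) and keeps a visited set, so A's per-node rescan of the whole edge list and the O(V) list membership test disappear, and the sum is accumulated during the traversal instead of in a second pass.
import Mathlib
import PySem

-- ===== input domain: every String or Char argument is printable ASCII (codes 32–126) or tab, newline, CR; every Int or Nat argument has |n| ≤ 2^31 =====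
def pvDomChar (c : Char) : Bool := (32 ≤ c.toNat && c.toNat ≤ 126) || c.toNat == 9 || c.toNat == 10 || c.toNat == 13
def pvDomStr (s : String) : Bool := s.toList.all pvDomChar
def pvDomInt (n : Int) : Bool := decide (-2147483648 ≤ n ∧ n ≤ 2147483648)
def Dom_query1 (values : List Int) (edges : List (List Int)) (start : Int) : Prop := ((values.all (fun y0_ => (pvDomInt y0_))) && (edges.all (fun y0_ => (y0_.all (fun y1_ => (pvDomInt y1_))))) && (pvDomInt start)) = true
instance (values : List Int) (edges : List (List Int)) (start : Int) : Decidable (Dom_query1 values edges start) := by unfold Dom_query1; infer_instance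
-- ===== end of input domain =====

-- B replaces A's per-node rescan of the whole edge list and O(V) list-membership test by an
-- adjacency dict (source -> its edges) built once plus a visited set, accumulating the sum
-- during the traversal (objective: alternative). The while-loops are ported with a fuel bound
-- that dominates the number of loop iterations ((E+1)^2+1); both ports use it identically.

-- ===== PORT A =====
def loopA (edges : List (List Int)) : Nat → List Int → List Int → List Int
  | 0, _, visit => visit
  | _ + 1, [], visit => visit
  | fuel + 1, a :: t, visit =>
      let node := (a :: t).getLast?.getD 0       -- stack.pop() from the end
      let rest := (a :: t).dropLast
      if visit.contains node then
        loopA edges fuel rest visit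
      else
        loopA edges fuel
          (edges.foldl (fun st e => if e.headD 0 == node then st ++ [e.getD 1 0] else st) rest)
          (visit ++ [node])

def query1 (values : List Int) (edges : List (List Int)) (start : Int) : Int :=
  let visit := loopA edges ((edges.length + 1) * (edges.length + 1) + 1) [start] []
  visit.foldl (fun s i => s + (PySem.List.pyGet? values (i - 1)).getD 0) 0

-- ===== PORT B =====
-- adj.setdefault(e[0], []).append(e): the dict stores the edges themselves, grouped by source.
def adjOf (edges : List (List Int)) : PySem.Dict Int (List (List Int)) :=
  edges.foldl (fun d e => d.modify (e.headD 0) [] (fun l => l ++ [e])) PySem.Dict.empty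

def loopB (values : List Int) (adj : PySem.Dict Int (List (List Int))) :
    Nat → List Int → PySem.Set Int → Int → Int
  | 0, _, _, total => total
  | _ + 1, [], _, total => total
  | fuel + 1, a :: t, seen, total =>
      let node := (a :: t).getLast?.getD 0
      let rest := (a :: t).dropLast
      if PySem.Set.contains seen node then
        loopB values adj fuel rest seen total
      else
        loopB values adj fuel
          (rest ++ (adj.getD node []).map (fun e => e.getD 1 0))   -- for e in adj.get(node, []): stack.append(e[1])
          (PySem.Set.add seen node)
          (total + (PySem.List.pyGet? values (node - 1)).getD 0)

def query1_alt (values : List Int) (edges : List (List Int)) (start : Int) : Int :=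
  loopB values (adjOf edges) ((edges.length + 1) * (edges.length + 1) + 1)
    [start] PySem.Set.empty 0

-- ===== PRECONDITION & SPEC =====
-- Standard reachability closure of the input graph from start (NOT the ports' traversal:
-- no stack, no visit order): one closure step adds every edge target whose source is already
-- reached; edges.length steps reach a fixpoint of the membership set.
def reachStep (edges : List (List Int)) (s : List Int) : List Int :=
  s ++ (edges.filter (fun e => s.contains (e.headD 0))).map (fun e => e.getD 1 0)

def reach (edges : List (List Int)) (start : Int) : List Int :=
  (List.range edges.length).foldl (fun s _ => reachStep edges s) [start]

-- Pre_ excludes exactly the inputs on which A raises: an empty edge (A reads i[0] of every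
-- edge), an edge of length 1 whose source is reachable from start (A reads its i[1]), or a
-- reachable node n with values[n-1] out of Python's index range (start is always reachable).
-- B raises on exactly the same inputs, so Pre_ excludes nothing on which A returns.
def Pre_query1 (values : List Int) (edges : List (List Int)) (start : Int) : Prop :=
  (∀ e ∈ edges, 1 ≤ e.length) ∧
  (∀ e ∈ edges, e.headD 0 ∈ reach edges start → 2 ≤ e.length) ∧
  (∀ n ∈ reach edges start, -(values.length : Int) ≤ n - 1 ∧ n - 1 < values.length)
instance (values : List Int) (edges : List (List Int)) (start : Int) : Decidable (Pre_query1 values edges start) := by unfold Pre_query1; infer_instance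

def pvWitness_query1 : List Int × List (List Int) × Int := ([10, 20, 30], [[1, 2], [2, 3]], 1)

def Spec_query1 (values : List Int) (edges : List (List Int)) (start : Int) (out : Int) : Prop := out = query1_alt values edges start
instance (values : List Int) (edges : List (List Int)) (start : Int) (out : Int) : Decidable (Spec_query1 values edges start out) := by unfold Spec_query1; infer_instance

-- ===== CLAIM (what is proved, stated in full; the proofs are below) =====
def Claim_equal_query1 : Prop := ∀ (values : List Int) (edges : List (List Int)) (start : Int), Dom_query1 values edges start → Pre_query1 values edges start → Spec_query1 values edges start (query1 values edges start)

-- ===== LEMMAS AND PROOFS =====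

-- B's dict lookup returns exactly the edges A's inner scan matches.
lemma adjOf_getD (edges : List (List Int)) (node : Int) :
    (adjOf edges).getD node [] = edges.filter (fun e => e.headD 0 == node) := by
  have h : adjOf edges
      = (edges.map (fun e => ((e.headD 0 : Int), e))).foldl
          (fun d p => d.modify p.1 [] (fun l => l ++ [p.2])) PySem.Dict.empty := by
    rw [List.foldl_map]; rfl
  rw [h, PySem.Dict.getD_foldl_modify_append]
  simp [List.filter_map, List.map_map, Function.comp_def]

-- Loop simulation: B's seen set IS A's visit list, and B's running total is the sum A takes
-- over visit afterwards.
lemma loop_eq (values : List Int) (edges : List (List Int)) :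
    ∀ (fuel : Nat) (stack visit : List Int) (total : Int),
      total = visit.foldl (fun s i => s + (PySem.List.pyGet? values (i - 1)).getD 0) 0 →
      (loopA edges fuel stack visit).foldl
          (fun s i => s + (PySem.List.pyGet? values (i - 1)).getD 0) 0
        = loopB values (adjOf edges) fuel stack visit total := by
  intro fuel
  induction fuel with
  | zero => intro stack visit total h; simp [loopA, loopB, h]
  | succ f ih =>
    intro stack visit total h
    cases stack with
    | nil => simp [loopA, loopB, h]
    | cons a t =>
      simp only [loopA, loopB]
      by_cases hc : visit.contains ((a :: t).getLast?.getD 0)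
      · have hc' : PySem.Set.contains visit ((a :: t).getLast?.getD 0) = true := hc
        simp only [hc, hc', if_true]
        exact ih _ _ _ h
      · have hc' : PySem.Set.contains visit ((a :: t).getLast?.getD 0) = false := by
          simpa using hc
        simp only [hc, hc', if_false, Bool.false_eq_true]
        rw [PySem.List.foldl_append_if, adjOf_getD, PySem.Set.add]
        simp only [hc', if_false, Bool.false_eq_true]
        apply ih
        simp [List.foldl_append, h]

-- ===== VERDICT (by name: the statement is the Claim_ definition above) =====
theorem query1_spec : Claim_equal_query1 := by
  intro values edges start _ _
  unfold Spec_query1 query1 query1_alt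
  exact loop_eq values edges _ [start] [] 0 rfl
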